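-- pv_equiv track=rewrite | github.com/deebakkarthi/sva_bench | svabench/__main__.py | top_mod_score
-- ===== SOURCE A (Python) =====
-- def top_mod_score(
--     hierarchy: dict[str, list[str]], mod: str, db: dict[str, int]
-- ) -> int:
--     """
--     Computes a "score" based on the size of the children instances inside a
--     module
--     Adapted from https://github.com/YosysHQ/yosys/passes/hierarchy/hierarchy.cc
--     """
--     if mod not in db:
--         score = 0
--         db[mod] = 0
--         if len(hierarchy[mod]) == 0:
--             return 0
--         for child in hierarchy[mod]:
--             score = max(score, (top_mod_score(hierarchy, child, db) + 1))
--         db[mod] = score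
--     return db[mod]
-- ===== SOURCE B (Python) =====
-- def top_mod_score(
--     hierarchy: dict[str, list[str]], mod: str, db: dict[str, int]
-- ) -> int:
--     # Iterative two-phase DFS with an explicit stack instead of memoized recursion.
--     stack = [("visit", mod)]
--     while stack:
--         op, node = stack.pop()
--         if op == "visit":
--             if node in db:
--                 continue
--             db[node] = 0
--             children = hierarchy[node]
--             stack.append(("finalize", node))
--             for c in reversed(children):
--                 stack.append(("visit", c))
--         else:
--             db[node] = max([0] + [db[c] + 1 for c in hierarchy[node]])
--     return db[mod]
-- ===== Notes on version B (the rewrite author's own statement) =====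
-- stated objective: alternative
-- what changed: Replaced the memoized recursion by an iterative DFS with an explicit stack of visit/finalize tasks mutating the same db (same cycle-breaking via the tentative db[node]=0, same final db contents and order).
-- outside the precondition, e.g. on top_mod_score({'a': [], 'b': ['zz']}, 'a', {}): A returns 0, B returns 0
import Mathlib
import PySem

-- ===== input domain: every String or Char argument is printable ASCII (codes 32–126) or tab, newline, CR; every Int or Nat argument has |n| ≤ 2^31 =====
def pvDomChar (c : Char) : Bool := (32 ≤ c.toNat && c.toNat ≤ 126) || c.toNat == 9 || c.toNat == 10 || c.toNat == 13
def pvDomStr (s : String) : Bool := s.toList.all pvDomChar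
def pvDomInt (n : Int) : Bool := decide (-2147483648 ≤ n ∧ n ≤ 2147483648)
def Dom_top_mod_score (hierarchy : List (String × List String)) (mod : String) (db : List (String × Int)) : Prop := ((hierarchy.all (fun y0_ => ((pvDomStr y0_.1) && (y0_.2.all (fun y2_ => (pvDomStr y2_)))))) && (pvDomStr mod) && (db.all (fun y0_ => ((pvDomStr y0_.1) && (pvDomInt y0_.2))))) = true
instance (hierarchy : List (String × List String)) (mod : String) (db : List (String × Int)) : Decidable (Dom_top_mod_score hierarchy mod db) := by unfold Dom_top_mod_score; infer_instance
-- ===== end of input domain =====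

-- B replaces A's memoized recursion by an explicit-stack two-phase iterative DFS over the same db
-- (same return value; both ports model A's/B's in-place mutation of db by threading the dict).


-- ===== PORT A =====
-- A is recursive; the port carries a fuel counter as a totality guard (none = fuel ran out or a
-- KeyError on `hierarchy[mod]`; both are impossible under Pre_, see the sufficiency lemmas below).
mutual
def tmsA (h : PySem.Dict String (List String)) : Nat → String → PySem.Dict String Int → Option (Int × PySem.Dict String Int)
  | 0, _, _ => none
  | Nat.succ f, mod, db =>
    if PySem.Dict.contains db mod then some (PySem.Dict.getD db mod 0, db)
    else
      let db1 := PySem.Dict.insert db mod 0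
      match PySem.Dict.get? h mod with
      | none => none                               -- Python: KeyError (excluded by Pre_)
      | some cs =>
        if cs.length = 0 then some (0, db1)        -- 'if len(hierarchy[mod]) == 0: return 0'
        else
          match tmsAList h f cs 0 db1 with
          | none => none
          | some (score, db2) => some (score, PySem.Dict.insert db2 mod score)
termination_by f _ _ => (f, 0)

def tmsAList (h : PySem.Dict String (List String)) : Nat → List String → Int → PySem.Dict String Int → Option (Int × PySem.Dict String Int)
  | _, [], score, db => some (score, db)
  | f, c :: cs, score, db =>
    match tmsA h f c db with
    | none => none
    | some (v, db') => tmsAList h f cs (max score (v + 1)) db'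
termination_by f cs _ _ => (f, cs.length + 1)
end

def top_mod_score (hierarchy : List (String × List String)) (mod : String) (db : List (String × Int)) : Int :=
  match tmsA ⟨hierarchy⟩ (hierarchy.length + 1) mod ⟨db⟩ with
  | some (v, _) => v
  | none => 0

-- ===== PORT B =====
inductive PvTask where
  | visit (s : String)
  | fin (s : String)
deriving DecidableEq, Repr

-- number of distinct hierarchy keys not yet in db (termination measure for the while loop)
def pvMu (h : PySem.Dict String (List String)) (db : PySem.Dict String Int) : Nat :=
  (h.keys.dedup.filter (fun k => ¬ PySem.Dict.contains db k)).length

theorem pvFilterMono (l : List String) (p q : String → Bool) (h : ∀ x ∈ l, q x = true → p x = true) :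
    (l.filter q).length ≤ (l.filter p).length := by
  induction l with
  | nil => simp
  | cons a l ih =>
    have ih' := ih (fun x hx => h x (List.mem_cons_of_mem _ hx))
    by_cases hq : q a = true
    · simp [hq, h a (List.mem_cons_self) hq]; omega
    · simp only [Bool.not_eq_true] at hq
      simp only [List.filter_cons, hq]
      cases hp : p a <;> simp <;> omega

theorem pvFilterStrict (l : List String) (p q : String → Bool) (h : ∀ x ∈ l, q x = true → p x = true)
    (s : String) (hs : s ∈ l) (hp : p s = true) (hq : q s = false) :
    (l.filter q).length < (l.filter p).length := by
  induction l with
  | nil => simp at hs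
  | cons a l ih =>
    rcases List.mem_cons.mp hs with rfl | hs'
    · have := pvFilterMono l p q (fun x hx => h x (List.mem_cons_of_mem _ hx))
      simp [hp, hq]; omega
    · have ih' := ih (fun x hx => h x (List.mem_cons_of_mem _ hx)) hs'
      by_cases hqa : q a = true
      · simp [hqa, h a (List.mem_cons_self) hqa]; omega
      · simp only [Bool.not_eq_true] at hqa
        simp only [List.filter_cons, hqa]
        cases hpa : p a <;> simp <;> omega

theorem pvMu_insert_le (h : PySem.Dict String (List String)) (db : PySem.Dict String Int) (s : String) (v : Int) :
    pvMu h (PySem.Dict.insert db s v) ≤ pvMu h db := by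
  unfold pvMu
  apply pvFilterMono
  intro x _ hx
  simp only [PySem.Dict.contains_insert] at hx ⊢
  simp only [decide_eq_true_eq] at *
  by_cases hxs : x == s <;> simp_all

theorem pvMu_insert_lt (h : PySem.Dict String (List String)) (db : PySem.Dict String Int) (s : String) (v : Int)
    (hk : s ∈ h.keys) (hc : PySem.Dict.contains db s = false) :
    pvMu h (PySem.Dict.insert db s v) < pvMu h db := by
  unfold pvMu
  apply pvFilterStrict _ _ _ _ s (List.mem_dedup.mpr hk)
  · simp [hc]
  · simp
  · intro x _ hx
    simp only [PySem.Dict.contains_insert] at hx ⊢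
    by_cases hxs : x == s <;> simp_all

-- the Python while-loop over the explicit stack; total by the measure (pvMu, stack length)
def loopB (h : PySem.Dict String (List String)) (stack : List PvTask) (db : PySem.Dict String Int) : PySem.Dict String Int :=
  match stack with
  | [] => db
  | PvTask.visit s :: rest =>
    if PySem.Dict.contains db s then loopB h rest db
    else
      let db1 := PySem.Dict.insert db s 0
      match hg : PySem.Dict.get? h s with
      | none => db1                                -- Python: KeyError (excluded by Pre_)
      | some cs => loopB h (cs.map PvTask.visit ++ PvTask.fin s :: rest) db1
  | PvTask.fin s :: rest =>
    match PySem.Dict.get? h s with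
    | none => db                                   -- unreachable in a run; totality branch
    | some cs =>
      loopB h rest (PySem.Dict.insert db s (cs.foldl (fun a c => max a (PySem.Dict.getD db c 0 + 1)) 0))
termination_by (pvMu h db, stack.length)
decreasing_by
  · exact Prod.Lex.right _ (by simp)
  · exact Prod.Lex.left _ _ (pvMu_insert_lt h db s 0
      ((PySem.Dict.contains_iff_mem_keys h s).mp (by rw [PySem.Dict.contains_eq_isSome_get?, hg]; rfl))
      (by simpa using ‹¬ PySem.Dict.contains db s = true›))
  · rcases Nat.lt_or_ge (pvMu h (PySem.Dict.insert db s (List.foldl (fun a c => max a (PySem.Dict.getD db c 0 + 1)) 0 cs))) (pvMu h db) with hlt | hge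
    · exact Prod.Lex.left _ _ hlt
    · have hle := pvMu_insert_le h db s (List.foldl (fun a c => max a (PySem.Dict.getD db c 0 + 1)) 0 cs)
      have heq := le_antisymm hle hge
      rw [heq]; exact Prod.Lex.right _ (by simp)

def top_mod_score_alt (hierarchy : List (String × List String)) (mod : String) (db : List (String × Int)) : Int :=
  PySem.Dict.getD (loopB ⟨hierarchy⟩ [PvTask.visit mod] ⟨db⟩) mod 0

-- ===== PRECONDITION & SPEC =====
-- Pre_ excludes the inputs on which A raises KeyError (a looked-up module missing from hierarchy).
-- It is slightly narrower than the exact raise-free set: it asks every child named ANYWHERE in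
-- hierarchy to be a hierarchy key or pre-seeded in db, whereas A only raises when a missing child
-- is actually REACHED from mod — a closed-form condition instead of a reachability computation.
def Pre_top_mod_score (hierarchy : List (String × List String)) (mod : String) (db : List (String × Int)) : Prop :=
  PySem.Dict.contains (⟨db⟩ : PySem.Dict String Int) mod = true ∨
  (mod ∈ hierarchy.map Prod.fst ∧
    ∀ p ∈ hierarchy, ∀ c ∈ p.2,
      PySem.Dict.contains (⟨db⟩ : PySem.Dict String Int) c = true ∨ c ∈ hierarchy.map Prod.fst)
instance (hierarchy : List (String × List String)) (mod : String) (db : List (String × Int)) : Decidable (Pre_top_mod_score hierarchy mod db) := by unfold Pre_top_mod_score; infer_instance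

def pvWitness_top_mod_score : (List (String × List String)) × String × (List (String × Int)) :=
  ([("a", ["b", "c"]), ("b", []), ("c", ["b"])], "a", [("d", 7)])

def Spec_top_mod_score (hierarchy : List (String × List String)) (mod : String) (db : List (String × Int)) (out : Int) : Prop := out = top_mod_score_alt hierarchy mod db
instance (hierarchy : List (String × List String)) (mod : String) (db : List (String × Int)) (out : Int) : Decidable (Spec_top_mod_score hierarchy mod db out) := by unfold Spec_top_mod_score; infer_instance

-- ===== CLAIM (what is proved, stated in full; the proofs are below) =====
def Claim_equal_top_mod_score : Prop := ∀ (hierarchy : List (String × List String)) (mod : String) (db : List (String × Int)), Dom_top_mod_score hierarchy mod db → Pre_top_mod_score hierarchy mod db → Spec_top_mod_score hierarchy mod db (top_mod_score hierarchy mod db)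

-- ===== LEMMAS AND PROOFS =====

-- unfold lemmas for the while loop (one per branch of the Python loop body)
theorem loopB_nil (h : PySem.Dict String (List String)) (db : PySem.Dict String Int) :
    loopB h [] db = db := by
  rw [loopB.eq_def]

theorem loopB_visit_mem (h : PySem.Dict String (List String)) (s : String) (rest : List PvTask)
    (db : PySem.Dict String Int) (hc : PySem.Dict.contains db s = true) :
    loopB h (PvTask.visit s :: rest) db = loopB h rest db := by
  rw [loopB.eq_def]; dsimp only; rw [if_pos hc]

theorem loopB_visit_new (h : PySem.Dict String (List String)) (s : String) (rest : List PvTask)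
    (db : PySem.Dict String Int) (cs : List String)
    (hc : ¬ PySem.Dict.contains db s = true) (hg : PySem.Dict.get? h s = some cs) :
    loopB h (PvTask.visit s :: rest) db
      = loopB h (cs.map PvTask.visit ++ PvTask.fin s :: rest) (PySem.Dict.insert db s 0) := by
  rw [loopB.eq_def]; dsimp only; rw [if_neg hc]
  split
  · next heq => rw [heq] at hg; cases hg
  · next cs' heq => rw [heq] at hg; cases hg; rfl

theorem loopB_fin (h : PySem.Dict String (List String)) (s : String) (rest : List PvTask)
    (db : PySem.Dict String Int) (cs : List String) (hg : PySem.Dict.get? h s = some cs) :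
    loopB h (PvTask.fin s :: rest) db
      = loopB h rest (PySem.Dict.insert db s
          (cs.foldl (fun a c => max a (PySem.Dict.getD db c 0 + 1)) 0)) := by
  rw [loopB.eq_def]; dsimp only
  split
  · next heq => rw [heq] at hg; cases hg
  · next cs' heq => rw [heq] at hg; cases hg; rfl

-- A only adds keys to db, never changes an existing entry, and always leaves its own
-- return value stored under the module it was asked about.
theorem pvMono (h : PySem.Dict String (List String)) : ∀ f : Nat,
    (∀ s db v db', tmsA h f s db = some (v, db') →
      ((∀ k, PySem.Dict.contains db k = true →
          PySem.Dict.contains db' k = true ∧ PySem.Dict.getD db' k 0 = PySem.Dict.getD db k 0) ∧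
        PySem.Dict.contains db' s = true ∧ PySem.Dict.getD db' s 0 = v)) ∧
    (∀ cs sc db v db', tmsAList h f cs sc db = some (v, db') →
      (∀ k, PySem.Dict.contains db k = true →
        PySem.Dict.contains db' k = true ∧ PySem.Dict.getD db' k 0 = PySem.Dict.getD db k 0)) := by
  intro f
  induction f with
  | zero =>
    constructor
    · intro s db v db' hA; simp [tmsA] at hA
    · intro cs sc db v db' hL
      cases cs with
      | nil =>
        simp [tmsAList] at hL
        obtain ⟨rfl, rfl⟩ := hL
        exact fun k hk => ⟨hk, rfl⟩
      | cons c cs => simp [tmsAList, tmsA] at hL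
  | succ f ih =>
    have hApart : ∀ s db v db', tmsA h (f + 1) s db = some (v, db') →
        ((∀ k, PySem.Dict.contains db k = true →
            PySem.Dict.contains db' k = true ∧ PySem.Dict.getD db' k 0 = PySem.Dict.getD db k 0) ∧
          PySem.Dict.contains db' s = true ∧ PySem.Dict.getD db' s 0 = v) := by
      intro s db v db' hA
      rw [tmsA] at hA
      split_ifs at hA with hcont
      · obtain ⟨rfl, rfl⟩ : v = PySem.Dict.getD db s 0 ∧ db' = db := by
          cases hA; exact ⟨rfl, rfl⟩
        exact ⟨fun k hk => ⟨hk, rfl⟩, hcont, rfl⟩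
      · have hne : ∀ k, PySem.Dict.contains db k = true → k ≠ s := by
          intro k hk hks; exact hcont (hks ▸ hk)
        cases hg : PySem.Dict.get? h s with
        | none => simp only [hg] at hA; cases hA
        | some cs =>
          simp only [hg] at hA
          split_ifs at hA with hlen
          · obtain ⟨rfl, rfl⟩ : v = 0 ∧ db' = PySem.Dict.insert db s 0 := by
              cases hA; exact ⟨rfl, rfl⟩
            refine ⟨fun k hk => ⟨?_, ?_⟩, ?_, ?_⟩
            · simp [PySem.Dict.contains_insert, hk]
            · exact PySem.Dict.getD_insert_of_ne _ _ _ (hne k hk)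
            · exact PySem.Dict.contains_insert_self _ _ _
            · exact PySem.Dict.getD_insert_self _ _ _ _
          · cases hres : tmsAList h f cs 0 (PySem.Dict.insert db s 0) with
            | none => simp only [hres] at hA; cases hA
            | some p =>
              obtain ⟨score, db2⟩ := p
              simp only [hres] at hA
              obtain ⟨rfl, rfl⟩ : v = score ∧ db' = PySem.Dict.insert db2 s score := by
                cases hA; exact ⟨rfl, rfl⟩
              have hpres := ih.2 cs 0 (PySem.Dict.insert db s 0) _ _ hres
              refine ⟨fun k hk => ?_, ?_, ?_⟩
              · have hk1 : PySem.Dict.contains (PySem.Dict.insert db s 0) k = true := by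
                  simp [PySem.Dict.contains_insert, hk]
                obtain ⟨hk2, hk3⟩ := hpres k hk1
                refine ⟨?_, ?_⟩
                · simp [PySem.Dict.contains_insert, hk2]
                · rw [PySem.Dict.getD_insert_of_ne _ _ _ (hne k hk), hk3,
                    PySem.Dict.getD_insert_of_ne _ _ _ (hne k hk)]
              · exact PySem.Dict.contains_insert_self _ _ _
              · exact PySem.Dict.getD_insert_self _ _ _ _
    refine ⟨hApart, ?_⟩
    intro cs
    induction cs with
    | nil =>
      intro sc db v db' hL
      simp [tmsAList] at hL
      obtain ⟨rfl, rfl⟩ := hL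
      exact fun k hk => ⟨hk, rfl⟩
    | cons c cs ihc =>
      intro sc db v db' hL
      rw [tmsAList] at hL
      cases hc : tmsA h (f + 1) c db with
      | none => simp only [hc] at hL; cases hL
      | some p =>
        obtain ⟨w, dbm⟩ := p
        simp only [hc] at hL
        have h1 := (hApart c db w dbm hc).1
        have h2 := ihc (max sc (w + 1)) dbm v db' hL
        intro k hk
        obtain ⟨hk1, hk2⟩ := h1 k hk
        obtain ⟨hk3, hk4⟩ := h2 k hk1
        exact ⟨hk3, by rw [hk4, hk2]⟩

theorem pvMu_anti (h : PySem.Dict String (List String)) (db db' : PySem.Dict String Int)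
    (hsub : ∀ k, PySem.Dict.contains db k = true → PySem.Dict.contains db' k = true) :
    pvMu h db' ≤ pvMu h db := by
  unfold pvMu
  apply pvFilterMono
  intro x _ hx
  simp only [decide_eq_true_eq] at *
  intro hc
  exact hx (hsub x hc)

-- under Pre_'s closure condition and with fuel above the measure, A never returns none
theorem pvSuff (h : PySem.Dict String (List String)) : ∀ f : Nat,
    (∀ s db, (∀ p ∈ h.items, ∀ c ∈ p.2, PySem.Dict.contains db c = true ∨ c ∈ h.keys) →
      (PySem.Dict.contains db s = true ∨ s ∈ h.keys) → pvMu h db < f →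
      ∃ r, tmsA h f s db = some r) ∧
    (∀ cs sc db, (∀ p ∈ h.items, ∀ c ∈ p.2, PySem.Dict.contains db c = true ∨ c ∈ h.keys) →
      (∀ c ∈ cs, PySem.Dict.contains db c = true ∨ c ∈ h.keys) → pvMu h db < f →
      ∃ r, tmsAList h f cs sc db = some r) := by
  intro f
  induction f with
  | zero => exact ⟨fun s db _ _ hmu => absurd hmu (by omega), fun cs sc db _ _ hmu => absurd hmu (by omega)⟩
  | succ f ih =>
    have hApart : ∀ s db, (∀ p ∈ h.items, ∀ c ∈ p.2, PySem.Dict.contains db c = true ∨ c ∈ h.keys) →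
        (PySem.Dict.contains db s = true ∨ s ∈ h.keys) → pvMu h db < f + 1 →
        ∃ r, tmsA h (f + 1) s db = some r := by
      intro s db hinv hs hmu
      rw [tmsA]
      by_cases hcont : PySem.Dict.contains db s = true
      · exact ⟨_, by rw [if_pos hcont]⟩
      · have hkey : s ∈ h.keys := hs.resolve_left hcont
        have hg : ∃ cs, PySem.Dict.get? h s = some cs := by
          have h1 : (PySem.Dict.get? h s).isSome = true := by
            rw [← PySem.Dict.contains_eq_isSome_get?]
            exact (PySem.Dict.contains_iff_mem_keys h s).mpr hkey
          exact Option.isSome_iff_exists.mp h1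
        obtain ⟨cs, hg⟩ := hg
        rw [if_neg hcont]
        simp only [hg]
        by_cases hlen : cs.length = 0
        · exact ⟨_, by rw [if_pos hlen]⟩
        · have hmem : (s, cs) ∈ h.items := PySem.Dict.mem_items_of_get?_eq_some h hg
          have hch : ∀ c ∈ cs, PySem.Dict.contains (PySem.Dict.insert db s 0) c = true ∨ c ∈ h.keys := by
            intro c hc
            rcases hinv (s, cs) hmem c hc with hcc | hcc
            · left; simp [PySem.Dict.contains_insert, hcc]
            · right; exact hcc
          have hinv1 : ∀ p ∈ h.items, ∀ c ∈ p.2, PySem.Dict.contains (PySem.Dict.insert db s 0) c = true ∨ c ∈ h.keys := by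
            intro p hp c hc
            rcases hinv p hp c hc with hcc | hcc
            · left; simp [PySem.Dict.contains_insert, hcc]
            · right; exact hcc
          have hmu1 : pvMu h (PySem.Dict.insert db s 0) < f :=
            lt_of_lt_of_le (pvMu_insert_lt h db s 0 hkey (by simpa using hcont)) (by omega)
          obtain ⟨⟨score, db2⟩, hres⟩ := ih.2 cs 0 (PySem.Dict.insert db s 0) hinv1 hch hmu1
          exact ⟨(score, PySem.Dict.insert db2 s score), by rw [if_neg hlen]; simp only [hres]⟩
    refine ⟨hApart, ?_⟩
    intro cs
    induction cs with
    | nil => exact fun sc db _ _ _ => ⟨_, by rw [tmsAList]⟩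
    | cons c cs ihc =>
      intro sc db hinv hch hmu
      obtain ⟨⟨w, dbm⟩, hc⟩ := hApart c db hinv (hch c (List.mem_cons_self)) hmu
      have hpres := ((pvMono h (f + 1)).1 c db w dbm hc).1
      have hsub : ∀ k, PySem.Dict.contains db k = true → PySem.Dict.contains dbm k = true :=
        fun k hk => (hpres k hk).1
      have hinv' : ∀ p ∈ h.items, ∀ c' ∈ p.2, PySem.Dict.contains dbm c' = true ∨ c' ∈ h.keys := by
        intro p hp c' hc'
        rcases hinv p hp c' hc' with hcc | hcc
        · exact Or.inl (hsub c' hcc)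
        · exact Or.inr hcc
      have hch' : ∀ c' ∈ cs, PySem.Dict.contains dbm c' = true ∨ c' ∈ h.keys := by
        intro c' hc'
        rcases hch c' (List.mem_cons_of_mem _ hc') with hcc | hcc
        · exact Or.inl (hsub c' hcc)
        · exact Or.inr hcc
      have hmu' : pvMu h dbm < f + 1 := lt_of_le_of_lt (pvMu_anti h db dbm hsub) hmu
      obtain ⟨r, hr⟩ := ihc (max sc (w + 1)) dbm hinv' hch' hmu'
      exact ⟨r, by rw [tmsAList]; simp only [hc]; exact hr⟩

-- simulation: one recursive call of A corresponds to the stack segment B processes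
theorem pvSim (h : PySem.Dict String (List String)) : ∀ f : Nat,
    (∀ s db v db', tmsA h f s db = some (v, db') →
      ∀ rest, loopB h (PvTask.visit s :: rest) db = loopB h rest db') ∧
    (∀ cs sc db v db', tmsAList h f cs sc db = some (v, db') →
      ((∀ rest, loopB h (cs.map PvTask.visit ++ rest) db = loopB h rest db') ∧
        v = cs.foldl (fun a c => max a (PySem.Dict.getD db' c 0 + 1)) sc)) := by
  intro f
  induction f with
  | zero =>
    constructor
    · intro s db v db' hA; simp [tmsA] at hA
    · intro cs sc db v db' hL
      cases cs with
      | nil =>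
        simp [tmsAList] at hL
        obtain ⟨rfl, rfl⟩ := hL
        exact ⟨fun rest => rfl, rfl⟩
      | cons c cs => simp [tmsAList, tmsA] at hL
  | succ f ih =>
    have hApart : ∀ s db v db', tmsA h (f + 1) s db = some (v, db') →
        ∀ rest, loopB h (PvTask.visit s :: rest) db = loopB h rest db' := by
      intro s db v db' hA rest
      rw [tmsA] at hA
      split_ifs at hA with hcont
      · obtain ⟨rfl, rfl⟩ : v = PySem.Dict.getD db s 0 ∧ db' = db := by
          cases hA; exact ⟨rfl, rfl⟩
        rw [loopB_visit_mem h s rest _ hcont]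
      · cases hg : PySem.Dict.get? h s with
        | none => simp only [hg] at hA; cases hA
        | some cs =>
          simp only [hg] at hA
          split_ifs at hA with hlen
          · obtain rfl : cs = [] := List.length_eq_zero_iff.mp hlen
            obtain ⟨rfl, rfl⟩ : v = 0 ∧ db' = PySem.Dict.insert db s 0 := by
              cases hA; exact ⟨rfl, rfl⟩
            rw [loopB_visit_new h s rest _ [] hcont hg]
            simp only [List.map_nil, List.nil_append]
            rw [loopB_fin h s rest (PySem.Dict.insert db s 0) [] hg]
            simp only [List.foldl_nil, PySem.Dict.insert_insert_self]
          · cases hres : tmsAList h f cs 0 (PySem.Dict.insert db s 0) with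
            | none => simp only [hres] at hA; cases hA
            | some p =>
              obtain ⟨score, db2⟩ := p
              simp only [hres] at hA
              obtain ⟨rfl, rfl⟩ : v = score ∧ db' = PySem.Dict.insert db2 s score := by
                cases hA; exact ⟨rfl, rfl⟩
              obtain ⟨hloop, hscore⟩ := ih.2 cs 0 (PySem.Dict.insert db s 0) _ _ hres
              rw [loopB_visit_new h s rest _ cs hcont hg]
              rw [hloop (PvTask.fin s :: rest)]
              rw [loopB_fin h s rest db2 cs hg]
              rw [← hscore]
    refine ⟨hApart, ?_⟩
    intro cs
    induction cs with
    | nil =>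
      intro sc db v db' hL
      simp [tmsAList] at hL
      obtain ⟨rfl, rfl⟩ := hL
      exact ⟨fun rest => rfl, rfl⟩
    | cons c cs ihc =>
      intro sc db v db' hL
      rw [tmsAList] at hL
      cases hc : tmsA h (f + 1) c db with
      | none => simp only [hc] at hL; cases hL
      | some p =>
        obtain ⟨w, dbm⟩ := p
        simp only [hc] at hL
        obtain ⟨hloop, hscore⟩ := ihc (max sc (w + 1)) dbm v db' hL
        have hmonoA := (pvMono h (f + 1)).1 c db w dbm hc
        have hval : PySem.Dict.getD db' c 0 = w := by
          have := ((pvMono h (f + 1)).2 cs (max sc (w + 1)) dbm v db' hL) c hmonoA.2.1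
          rw [this.2, hmonoA.2.2]
        constructor
        · intro rest
          have h1 : loopB h (PvTask.visit c :: (cs.map PvTask.visit ++ rest)) db
              = loopB h (cs.map PvTask.visit ++ rest) dbm := hApart c db w dbm hc _
          simpa [List.map_cons, List.cons_append] using h1.trans (hloop rest)
        · simp only [List.foldl_cons, hval]
          exact hscore

-- ===== VERDICT (by name: the statement is the Claim_ definition above) =====
theorem top_mod_score_spec : Claim_equal_top_mod_score := by
  intro hierarchy mod db _ hPre
  unfold Spec_top_mod_score top_mod_score top_mod_score_alt
  rcases hPre with hcont | ⟨hmod, hinv⟩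
  · rw [tmsA, if_pos hcont, loopB_visit_mem _ mod [] _ hcont, loopB_nil]
  · have hinv' : ∀ p ∈ (⟨hierarchy⟩ : PySem.Dict String (List String)).items, ∀ c ∈ p.2,
        PySem.Dict.contains (⟨db⟩ : PySem.Dict String Int) c = true
          ∨ c ∈ (⟨hierarchy⟩ : PySem.Dict String (List String)).keys := hinv
    have hmod' : mod ∈ (⟨hierarchy⟩ : PySem.Dict String (List String)).keys := hmod
    have hbound : pvMu ⟨hierarchy⟩ (⟨db⟩ : PySem.Dict String Int) < hierarchy.length + 1 := by
      have h1 : pvMu (⟨hierarchy⟩ : PySem.Dict String (List String)) ⟨db⟩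
          ≤ ((⟨hierarchy⟩ : PySem.Dict String (List String)).keys.dedup).length := by
        unfold pvMu; exact List.length_filter_le _ _
      have h2 := (List.dedup_sublist ((⟨hierarchy⟩ : PySem.Dict String (List String)).keys)).length_le
      have h3 : ((⟨hierarchy⟩ : PySem.Dict String (List String)).keys).length = hierarchy.length := by
        simp [PySem.Dict.keys]
      omega
    obtain ⟨⟨v, db'⟩, hr⟩ :=
      (pvSuff ⟨hierarchy⟩ (hierarchy.length + 1)).1 mod ⟨db⟩ hinv' (Or.inr hmod') hbound
    rw [hr]
    rw [(pvSim ⟨hierarchy⟩ (hierarchy.length + 1)).1 mod ⟨db⟩ v db' hr [], loopB_nil]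
    exact (((pvMono ⟨hierarchy⟩ (hierarchy.length + 1)).1 mod ⟨db⟩ v db' hr).2.2).symm
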